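-- pv_equiv track=rewrite | github.com/machalvan/advent-of-code-2021 | day12/main.py | find_paths_part1
-- ===== SOURCE A (Python) =====
-- def find_paths_part1(graph, start, end, path=None):
--     path = [start] if path is None else path + [start]
--
--     if start == end:
--         return [path]
--     if start not in graph:
--         return []
--
--     paths = []
--     for node in graph[start]:
--         if node in path and node.islower():
--             continue
--
--         paths.extend(find_paths_part1(graph, node, end, path))
--
--     return paths
-- ===== SOURCE B (Python) =====
-- def find_paths_part1(graph, start, end, path=None):
--     # Different decomposition: an inner helper returns path TAILS from the current
--     # node, tracking visited caves in a set instead of threading/copying the full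
--     # growing path list; the fixed prefix is attached once at the end.
--     prefix = [] if path is None else list(path)
--
--     def tails(node, seen):
--         if node == end:
--             return [[node]]
--         res = []
--         for nb in graph.get(node, ()):
--             if nb.islower() and nb in seen:
--                 continue
--             res.extend([node] + t for t in tails(nb, seen | {nb}))
--         return res
--
--     return [prefix + t for t in tails(start, set(prefix) | {start})]
-- ===== Notes on version B (the rewrite author's own statement) =====
-- stated objective: alternative
-- what changed: Instead of threading and copying the full growing path through the recursion, B's inner helper returns path tails from the current node while tracking visited caves in a set, and the fixed prefix is attached once at the end.
import Mathlib
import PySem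

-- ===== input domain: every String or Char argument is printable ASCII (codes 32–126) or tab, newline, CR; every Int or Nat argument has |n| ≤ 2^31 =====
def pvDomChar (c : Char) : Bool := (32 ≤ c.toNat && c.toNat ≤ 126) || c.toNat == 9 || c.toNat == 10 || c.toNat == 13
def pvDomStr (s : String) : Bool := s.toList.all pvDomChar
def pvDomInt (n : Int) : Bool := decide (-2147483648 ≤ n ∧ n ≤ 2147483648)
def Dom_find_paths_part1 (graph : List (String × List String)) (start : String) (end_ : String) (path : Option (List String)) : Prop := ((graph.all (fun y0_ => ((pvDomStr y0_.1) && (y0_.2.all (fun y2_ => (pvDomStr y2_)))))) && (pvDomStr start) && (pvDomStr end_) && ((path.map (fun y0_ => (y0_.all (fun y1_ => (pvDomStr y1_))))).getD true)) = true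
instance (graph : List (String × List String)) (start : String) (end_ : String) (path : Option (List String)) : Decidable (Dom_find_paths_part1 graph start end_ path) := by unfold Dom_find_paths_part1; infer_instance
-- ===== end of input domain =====

-- B replaces A's recursion that threads and copies the full growing path by an inner
-- helper returning path TAILS from the current node with a set of seen caves, the fixed
-- prefix mapped on once at the end (objective: alternative decomposition, same results).


-- str.islower(), ported by hand (exact on the ASCII domain: the cased characters are
-- the letters, so islower = no uppercase letter present and at least one lowercase letter).
def pvIslower (s : String) : Bool :=
  s.toList.all (fun c => !(PySem.Chars.isupper c)) && s.toList.any (fun c => PySem.Chars.islower c)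

-- Totality guard shared by both ports: a fuel bound generously above the recursion depth
-- Python reaches on any input admitted by Pre_ below.
def pvFuel (graph : List (String × List String)) (path : Option (List String)) : Nat :=
  let n := graph.foldl (fun a kv => a + kv.2.length + 1) 0 +
    (match path with | none => 0 | some l => l.length) + 3
  n * n

-- ===== PORT A =====
def find_paths_part1_fuel (graph : List (String × List String)) (end_ : String) :
    Nat → String → List String → List (List String)
  | 0, _, _ => []
  | f + 1, start, path =>
    let path' := path ++ [start]
    if start = end_ then [path']
    else
      match PySem.Dict.get? (PySem.Dict.mk graph) start with
      | none => []
      | some ns =>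
        ns.foldl (fun paths node =>
          if node ∈ path' ∧ pvIslower node = true then paths
          else paths ++ find_paths_part1_fuel graph end_ f node path') []

def find_paths_part1 (graph : List (String × List String)) (start : String) (end_ : String) (path : Option (List String)) : List (List String) :=
  -- 'path = [start] if path is None else path + [start]' is performed inside the fuelled
  -- body (it appends start to the base list: [] for None, the given list otherwise).
  find_paths_part1_fuel graph end_ (pvFuel graph path) start
    (match path with | none => [] | some l => l)

-- ===== PORT B =====
def pvTails (graph : List (String × List String)) (end_ : String) :
    Nat → PySem.Set String → String → List (List String)
  | 0, _, _ => []
  | f + 1, seen, node =>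
    if node = end_ then [[node]]
    else
      (PySem.Dict.getD (PySem.Dict.mk graph) node []).foldl (fun res nb =>
        if pvIslower nb = true ∧ PySem.Set.contains seen nb = true then res
        else res ++ (pvTails graph end_ f (seen.add nb) nb).map (fun t => node :: t)) []

def find_paths_part1_alt (graph : List (String × List String)) (start : String) (end_ : String) (path : Option (List String)) : List (List String) :=
  let pfx := match path with | none => [] | some l => l
  (pvTails graph end_ (pvFuel graph path) ((PySem.Set.ofList pfx).add start) start).map
    (fun t => pfx ++ t)

-- ===== PRECONDITION & SPEC =====
def pvGraphSize (graph : List (String × List String)) : Nat :=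
  graph.foldl (fun a kv => a + kv.2.length) 0 + 1

-- Successors A can actually follow from cave u given the initial prefix pfx: none once
-- end_ is reached, and never an islower cave already in pfx (a simple path revisits nothing
-- else, so these are exactly the edges along which A's search can progress).
def pvSucc (graph : List (String × List String)) (end_ : String) (pfx : List String) (u : String) : List String :=
  if u = end_ then []
  else (PySem.Dict.getD (PySem.Dict.mk graph) u []).filter
    (fun v => !(pvIslower v && decide (v ∈ pfx)))

def pvReachable (graph : List (String × List String)) (end_ : String) (pfx : List String) (start : String) : List String :=
  (fun S => PySem.List.dedup (S ++ S.flatMap (pvSucc graph end_ pfx)))^[pvGraphSize graph] [start]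

-- Successors along which A can loop forever: non-islower caves (nothing ever blocks them),
-- except from end_, where A returns before recursing.
def pvUpSucc (graph : List (String × List String)) (end_ : String) (k : String) : List String :=
  if k = end_ then []
  else (PySem.Dict.getD (PySem.Dict.mk graph) k []).filter (fun v => pvIslower v = false)

def pvUpReach (graph : List (String × List String)) (end_ : String) (k : String) : List String :=
  (fun S => PySem.List.dedup (S ++ S.flatMap (pvUpSucc graph end_)))^[pvGraphSize graph] (pvUpSucc graph end_ k)

-- Pre_ excludes the inputs on which A recurses forever and Python raises RecursionError:
-- those where a cycle of non-islower caves (not through end_) is reachable from start.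
def Pre_find_paths_part1 (graph : List (String × List String)) (start : String) (end_ : String) (path : Option (List String)) : Prop :=
  ∀ k ∈ pvReachable graph end_ (path.getD []) start,
    pvIslower k = false → k ∉ pvUpReach graph end_ k
instance (graph : List (String × List String)) (start : String) (end_ : String) (path : Option (List String)) : Decidable (Pre_find_paths_part1 graph start end_ path) := by unfold Pre_find_paths_part1; infer_instance

def pvWitness_find_paths_part1 : (List (String × List String)) × String × String × Option (List String) :=
  ([("start", ["a", "end"]), ("a", ["end"])], "start", "end", none)

def Spec_find_paths_part1 (graph : List (String × List String)) (start : String) (end_ : String) (path : Option (List String)) (out : List (List String)) : Prop := out = find_paths_part1_alt graph start end_ path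
instance (graph : List (String × List String)) (start : String) (end_ : String) (path : Option (List String)) (out : List (List String)) : Decidable (Spec_find_paths_part1 graph start end_ path out) := by unfold Spec_find_paths_part1; infer_instance

-- ===== CLAIM (what is proved, stated in full; the proofs are below) =====
def Claim_equal_find_paths_part1 : Prop := ∀ (graph : List (String × List String)) (start : String) (end_ : String) (path : Option (List String)), Dom_find_paths_part1 graph start end_ path → Pre_find_paths_part1 graph start end_ path → Spec_find_paths_part1 graph start end_ path (find_paths_part1 graph start end_ path)

-- ===== LEMMAS AND PROOFS =====

theorem pv_contains_iff_mem (s : PySem.Set String) (x : String) :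
    PySem.Set.contains s x = true ↔ x ∈ s := by
  simp [PySem.Set.contains]

-- 'if c then skip else append' as a flatMap.
theorem pv_foldl_if {α β : Type} (c : α → Prop) [DecidablePred c] (g : α → List β)
    (l : List α) (acc : List β) :
    l.foldl (fun a x => if c x then a else a ++ g x) acc =
      acc ++ l.flatMap (fun x => if c x then [] else g x) := by
  induction l generalizing acc with
  | nil => simp
  | cons y ys ih => by_cases h : c y <;> simp [h, ih, List.append_assoc]

-- The two fuelled recursions agree step for step (same fuel, same recursion tree):
-- A's call on base list p at cave s equals B's tails from s mapped under (p ++ ·),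
-- for any seen-set whose membership is exactly that of the list p ++ [s].
theorem pv_main (graph : List (String × List String)) (end_ : String) :
    ∀ (f : Nat) (p : List String) (s : String) (seen : PySem.Set String),
      (∀ x, PySem.Set.contains seen x = true ↔ x ∈ p ++ [s]) →
      find_paths_part1_fuel graph end_ f s p =
        (pvTails graph end_ f seen s).map (fun t => p ++ t) := by
  intro f
  induction f with
  | zero => intro p s seen _; simp [find_paths_part1_fuel, pvTails]
  | succ f ih =>
    intro p s seen hseen
    by_cases hse : s = end_
    · simp [find_paths_part1_fuel, pvTails, hse]
    · rw [find_paths_part1_fuel, pvTails]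
      simp only [hse, if_false]
      cases hget : PySem.Dict.get? (PySem.Dict.mk graph) s with
      | none =>
        have h2 : PySem.Dict.getD (PySem.Dict.mk graph) s [] = [] := by
          simp [PySem.Dict.getD, hget]
        dsimp only
        rw [h2]; simp
      | some ns =>
        have h2 : PySem.Dict.getD (PySem.Dict.mk graph) s [] = ns := by
          simp [PySem.Dict.getD, hget]
        dsimp only
        rw [h2, pv_foldl_if, pv_foldl_if, List.nil_append, List.nil_append,
          List.map_flatMap]
        refine List.flatMap_congr (fun n _ => ?_)
        have hcond : (n ∈ p ++ [s] ∧ pvIslower n = true) ↔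
            (pvIslower n = true ∧ PySem.Set.contains seen n = true) := by
          rw [hseen n]; tauto
        by_cases hc : n ∈ p ++ [s] ∧ pvIslower n = true
        · rw [if_pos hc, if_pos (hcond.mp hc)]; rfl
        · rw [if_neg hc, if_neg (fun h => hc (hcond.mpr h))]
          have hseen' : ∀ x, PySem.Set.contains (seen.add n) x = true ↔
              x ∈ (p ++ [s]) ++ [n] := by
            intro x
            rw [pv_contains_iff_mem, PySem.Set.mem_add]
            have hmem : x ∈ seen ↔ x ∈ p ++ [s] := by
              rw [← pv_contains_iff_mem, hseen]
            simp only [List.mem_append, List.mem_singleton] at *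
            tauto
          rw [ih (p ++ [s]) n (seen.add n) hseen']
          simp [List.map_map, Function.comp, List.append_assoc]

-- ===== VERDICT (by name: the statement is the Claim_ definition above) =====
theorem find_paths_part1_spec : Claim_equal_find_paths_part1 := by
  intro graph start end_ path _ _
  unfold Spec_find_paths_part1 find_paths_part1 find_paths_part1_alt
  cases path with
  | none =>
    exact pv_main graph end_ (pvFuel graph none) [] start _ (by
      intro x
      rw [pv_contains_iff_mem, PySem.Set.mem_add, PySem.Set.mem_ofList]
      simp)
  | some l =>
    exact pv_main graph end_ (pvFuel graph (some l)) l start _ (by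
      intro x
      rw [pv_contains_iff_mem, PySem.Set.mem_add, PySem.Set.mem_ofList]
      simp [List.mem_append, or_comm])
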